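-- pv_equiv track=rewrite | github.com/JoaoLMPereira/acx-acronym-expander | acrodisam/AcroExpExtractors/AcroExpExtractor_MadDog.py | _filterout_roman_numbers
-- ===== SOURCE A (Python) =====
-- def _filterout_roman_numbers(diction):
--     """Removes acronyms that are roman numerals from the given dictionary.
--
--     Args:
--         diction (dict): a dictionary with acronym-expansion pairs
--
--     Returns:
--         [dict]:  a dictionary with acronym-expansion pairs with acronym that are roman numerals removed
--     """
--
--     acronyms = set(diction.keys())
--     for acr in acronyms:
--         # instead of all roman acronyms we remove only 1 to 20:
--         if acr in [
--             "I",
--             "II",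
--             "III",
--             "IV",
--             "V",
--             "VI",
--             "VII",
--             "VIII",
--             "IX",
--             "X",
--             "XI",
--             "XII",
--             "XIII",
--             "XIV",
--             "XV",
--             "XVI",
--             "XVII",
--             "XVIII",
--             "XIX",
--             "XX",
--         ]:
--             del diction[acr]
--     return diction
-- ===== SOURCE B (Python) =====
-- _ROMAN_NUMERALS_1_20 = (
--     "I", "II", "III", "IV", "V", "VI", "VII", "VIII", "IX", "X",
--     "XI", "XII", "XIII", "XIV", "XV", "XVI", "XVII", "XVIII", "XIX", "XX",
-- )
--
--
-- def _filterout_roman_numbers(diction):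
--     """Removes acronyms that are roman numerals (I..XX) from the given dictionary, in place."""
--     for roman in _ROMAN_NUMERALS_1_20:
--         diction.pop(roman, None)
--     return diction
-- ===== Notes on version B (the rewrite author's own statement) =====
-- stated objective: idiomatic
-- what changed: Instead of iterating over a snapshot of all dictionary keys and testing each against a 20-element list, B loops over the fixed 20 roman numerals and pops each from the dict with a default, still mutating and returning the same dict object.
import Mathlib
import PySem

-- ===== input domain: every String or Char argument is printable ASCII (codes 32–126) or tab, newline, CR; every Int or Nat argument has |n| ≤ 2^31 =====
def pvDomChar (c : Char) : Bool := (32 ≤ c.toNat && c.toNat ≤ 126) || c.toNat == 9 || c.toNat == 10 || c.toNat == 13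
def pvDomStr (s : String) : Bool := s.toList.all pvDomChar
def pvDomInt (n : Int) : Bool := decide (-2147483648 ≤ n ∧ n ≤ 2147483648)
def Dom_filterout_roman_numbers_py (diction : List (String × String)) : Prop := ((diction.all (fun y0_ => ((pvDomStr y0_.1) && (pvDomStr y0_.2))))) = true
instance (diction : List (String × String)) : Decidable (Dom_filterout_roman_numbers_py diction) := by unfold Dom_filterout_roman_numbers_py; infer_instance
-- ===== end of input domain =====

-- B removes the 20 roman numerals by popping each from the dict (with a default) instead of
-- scanning all keys and testing membership in a 20-element list; same result, mutation preserved.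

-- ===== PORT A =====
-- A: acronyms = set(diction.keys()); for acr in acronyms: if acr in [I..XX]: del diction[acr].
-- The dict is an association list; 'del diction[acr]' removes the entry with that key.
-- Iteration over the set is hash-ordered in Python, but the deletions of distinct keys commute,
-- so folding over the set in its insertion order is exact.
def filterout_roman_numbers_py (diction : List (String × String)) : List (String × String) :=
  let acronyms : PySem.Set String := PySem.Set.ofList (diction.map Prod.fst)
  acronyms.foldl
    (fun d acr =>
      if ["I", "II", "III", "IV", "V", "VI", "VII", "VIII", "IX", "X",
          "XI", "XII", "XIII", "XIV", "XV", "XVI", "XVII", "XVIII", "XIX", "XX"].contains acr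
      then d.filter (fun p => !(p.1 == acr))   -- del diction[acr]
      else d)
    diction

-- ===== PORT B =====
-- B-side helper: the module-level constant _ROMAN_NUMERALS_1_20
def ROMAN_NUMERALS_1_20 : List String :=
  ["I", "II", "III", "IV", "V", "VI", "VII", "VIII", "IX", "X",
   "XI", "XII", "XIII", "XIV", "XV", "XVI", "XVII", "XVIII", "XIX", "XX"]

-- B: for roman in _ROMAN_NUMERALS_1_20: diction.pop(roman, None)
def filterout_roman_numbers_py_alt (diction : List (String × String)) : List (String × String) :=
  ROMAN_NUMERALS_1_20.foldl
    (fun d roman => d.filter (fun p => !(p.1 == roman)))   -- diction.pop(roman, None)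
    diction

-- ===== PRECONDITION & SPEC =====
def Spec_filterout_roman_numbers_py (diction : List (String × String)) (out : List (String × String)) : Prop := out = filterout_roman_numbers_py_alt diction
instance (diction : List (String × String)) (out : List (String × String)) : Decidable (Spec_filterout_roman_numbers_py diction out) := by unfold Spec_filterout_roman_numbers_py; infer_instance

-- ===== CLAIM (what is proved, stated in full; the proofs are below) =====
def Claim_equal_filterout_roman_numbers_py : Prop := ∀ (diction : List (String × String)), Dom_filterout_roman_numbers_py diction → Spec_filterout_roman_numbers_py diction (filterout_roman_numbers_py diction)

-- ===== LEMMAS AND PROOFS =====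

-- Folding unconditional key-deletions over ks = filtering out all keys in ks.
theorem foldl_erase_eq_filter (ks : List String) (d : List (String × String)) :
    ks.foldl (fun d k => d.filter (fun p => !(p.1 == k))) d
      = d.filter (fun p => !(ks.contains p.1)) := by
  induction ks generalizing d with
  | nil => simp
  | cons k ks ih =>
    simp only [List.foldl_cons, ih, List.filter_filter]
    refine List.filter_congr (fun p _ => ?_)
    by_cases h : p.1 = k <;> simp [h]

-- Folding conditional key-deletions over ks = filtering out keys in ks satisfying the condition.
theorem foldl_cond_erase_eq_filter (c : String → Bool) (ks : List String)
    (d : List (String × String)) :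
    ks.foldl (fun d k => if c k then d.filter (fun p => !(p.1 == k)) else d) d
      = d.filter (fun p => !(c p.1 && ks.contains p.1)) := by
  induction ks generalizing d with
  | nil => simp
  | cons k ks ih =>
    simp only [List.foldl_cons]
    by_cases hc : c k
    · rw [hc, if_pos rfl, ih, List.filter_filter]
      refine List.filter_congr (fun p _ => ?_)
      by_cases h : p.1 = k <;> simp [h, hc]
    · rw [if_neg (by simp [hc]), ih]
      refine List.filter_congr (fun p _ => ?_)
      by_cases h : p.1 = k <;> simp [h, hc]

-- ===== VERDICT (by name: the statement is the Claim_ definition above) =====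
theorem filterout_roman_numbers_py_spec : Claim_equal_filterout_roman_numbers_py := by
  intro diction _
  unfold Spec_filterout_roman_numbers_py filterout_roman_numbers_py filterout_roman_numbers_py_alt
  rw [foldl_cond_erase_eq_filter, foldl_erase_eq_filter]
  refine List.filter_congr (fun p hp => ?_)
  simp only [ROMAN_NUMERALS_1_20]
  simp
  intro h
  exact absurd hp (by simpa using h p.2)
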